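-- pv_equiv track=rewrite | github.com/jomesh18/Leetcode | Leetcode_challenge/2023/03. March/29.maxSatisfaction.py | maxSatisfaction
-- ===== SOURCE A (Python) =====
-- from typing import List
--
-- def maxSatisfaction(satisfaction: List[int]) -> int:
--     satisfaction.sort()
--     n = len(satisfaction)
--     ans = 0
--     for i in range(n):
--         curr = 0
--         for j in range(i, n):
--             curr += (j-i+1)*satisfaction[j]
--         ans = max(ans, curr)
--     return ans
-- ===== SOURCE B (Python) =====
-- def maxSatisfaction(satisfaction):
--     satisfaction.sort()
--     suffix = 0
--     total = 0
--     ans = 0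
--     for x in reversed(satisfaction):
--         suffix += x
--         total += suffix
--         ans = max(ans, total)
--     return ans
-- ===== Notes on version B (the rewrite author's own statement) =====
-- stated objective: faster
-- what changed: Replaced the quadratic re-summation of every sorted suffix with a single backward pass that maintains the suffix sum and the running time-weighted total, so the inner loop disappears.
import Mathlib
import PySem

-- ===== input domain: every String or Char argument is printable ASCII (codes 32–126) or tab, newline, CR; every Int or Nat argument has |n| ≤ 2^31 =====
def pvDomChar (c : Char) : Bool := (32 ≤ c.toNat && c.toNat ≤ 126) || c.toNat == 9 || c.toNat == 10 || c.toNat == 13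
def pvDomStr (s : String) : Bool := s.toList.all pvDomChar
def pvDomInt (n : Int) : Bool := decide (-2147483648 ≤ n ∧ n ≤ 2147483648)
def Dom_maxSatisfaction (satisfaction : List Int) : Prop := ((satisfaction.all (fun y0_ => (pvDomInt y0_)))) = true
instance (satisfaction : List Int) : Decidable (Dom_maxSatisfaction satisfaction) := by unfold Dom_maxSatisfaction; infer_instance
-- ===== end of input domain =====

-- B replaces A's quadratic per-suffix re-summation by one backward pass keeping the running
-- suffix sum and weighted total (faster; both versions sort the argument in place in Python,
-- the equivalence proved here is about the return value).

-- ===== PORT A =====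
def maxSatisfaction (satisfaction : List Int) : Int :=
  let s := PySem.List.sorted satisfaction (fun x => x) false
  let n : Int := s.length
  (PySem.List.pyRange 0 n 1).foldl (fun ans i =>
    let curr := (PySem.List.pyRange i n 1).foldl
      (fun curr j => curr + (j - i + 1) * PySem.List.pyGetD s j 0) 0
    max ans curr) 0

-- ===== PORT B =====
def maxSatisfaction_alt (satisfaction : List Int) : Int :=
  let s := PySem.List.sorted satisfaction (fun x => x) false
  let r := s.reverse.foldl (fun (st : Int × Int × Int) x =>
    let suffix := st.1 + x
    let total := st.2.1 + suffix
    (suffix, total, max st.2.2 total)) (0, 0, 0)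
  r.2.2

-- ===== PRECONDITION & SPEC =====
def Spec_maxSatisfaction (satisfaction : List Int) (out : Int) : Prop := out = maxSatisfaction_alt satisfaction
instance (satisfaction : List Int) (out : Int) : Decidable (Spec_maxSatisfaction satisfaction out) := by unfold Spec_maxSatisfaction; infer_instance

-- ===== CLAIM (what is proved, stated in full; the proofs are below) =====
def Claim_equal_maxSatisfaction : Prop := ∀ (satisfaction : List Int), Dom_maxSatisfaction satisfaction → Spec_maxSatisfaction satisfaction (maxSatisfaction satisfaction)

-- ===== LEMMAS AND PROOFS =====

-- Wsum l = Σ (i+1) * l[i], the time-weighted sum of a suffix started at time 1.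
def Wsum : List Int → Int
  | [] => 0
  | x :: t => x + t.sum + Wsum t

-- maxAns l = max of 0 and Wsum of every suffix of l.
def maxAns : List Int → Int
  | [] => 0
  | x :: t => max (maxAns t) (Wsum (x :: t))

theorem alt_foldr (s : List Int) :
    s.foldr (fun x (st : Int × Int × Int) =>
      (st.1 + x, st.2.1 + (st.1 + x), max st.2.2 (st.2.1 + (st.1 + x)))) (0, 0, 0)
    = (s.sum, Wsum s, maxAns s) := by
  induction s with
  | nil => simp [Wsum, maxAns]
  | cons x t ih =>
    simp only [List.foldr_cons, ih, List.sum_cons, Wsum, maxAns]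
    refine Prod.ext (by ring) (Prod.ext (by ring) ?_)
    simp only
    ring_nf

theorem alt_eq (xs : List Int) :
    maxSatisfaction_alt xs = maxAns (PySem.List.sorted xs (fun x => x) false) := by
  show (((PySem.List.sorted xs (fun x => x) false).reverse.foldl (fun (st : Int × Int × Int) x =>
      (st.1 + x, st.2.1 + (st.1 + x), max st.2.2 (st.2.1 + (st.1 + x)))) (0, 0, 0)).2.2)
    = maxAns (PySem.List.sorted xs (fun x => x) false)
  rw [List.foldl_reverse, alt_foldr]

theorem inner_eq (s : List Int) :
    ∀ (d i : Nat), d = s.length - i →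
    (((PySem.List.pyRange (i : Int) (s.length : Int) 1).map
        (fun j => (j - (i : Int) + 1) * PySem.List.pyGetD s j 0)).sum)
      = Wsum (s.drop i) := by
  intro d
  induction d with
  | zero =>
    intro i h
    have hle : s.length ≤ i := by omega
    rw [PySem.List.pyRange_one_eq_nil (by exact_mod_cast hle)]
    rw [List.drop_eq_nil_of_le hle]
    simp [Wsum]
  | succ d ih =>
    intro i h
    have hlt : i < s.length := by omega
    rw [PySem.List.pyRange_one_cons (by exact_mod_cast hlt)]
    rw [List.map_cons, List.sum_cons]
    have hcast : (i : Int) + 1 = ((i + 1 : Nat) : Int) := by push_cast; ring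
    have hfun : (fun j => (j - (i : Int) + 1) * PySem.List.pyGetD s j 0)
        = (fun j => (j - ((i + 1 : Nat) : Int) + 1) * PySem.List.pyGetD s j 0
            + PySem.List.pyGetD s j 0) := by
      funext j; push_cast; ring
    rw [hcast, hfun, PySem.List.sum_map_add_int, ih (i + 1) (by omega)]
    have hdropmap : ((PySem.List.pyRange ((i + 1 : Nat) : Int) (s.length : Int) 1).map
        (fun j => PySem.List.pyGetD s j 0)).sum = (s.drop (i + 1)).sum := by
      rw [PySem.List.map_pyGetD_pyRange' s 0 (a := ((i + 1 : Nat) : Int)) (by exact_mod_cast Nat.zero_le _)]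
      simp
    rw [hdropmap]
    rw [List.drop_eq_getElem_cons hlt]
    have hget : PySem.List.pyGetD s (i : Int) 0 = s[i] := by
      rw [PySem.List.pyGetD_natCast]
      exact List.getD_eq_getElem s 0 hlt
    simp only [Wsum, hget]
    ring

theorem foldl_max_init {β : Type} (h : β → Int) (l : List β) :
    ∀ (a b : Int), l.foldl (fun acc k => max acc (h k)) (max a b)
      = max (l.foldl (fun acc k => max acc (h k)) a) b := by
  induction l with
  | nil => intro a b; simp
  | cons x t ih =>
    intro a b
    simp only [List.foldl_cons]
    rw [max_right_comm, ih]

theorem outer_eq (s : List Int) :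
    (List.range s.length).foldl (fun a k => max a (Wsum (s.drop k))) 0 = maxAns s := by
  induction s with
  | nil => simp [maxAns]
  | cons x t ih =>
    have hlen : (x :: t).length = t.length + 1 := rfl
    rw [hlen, List.range_succ_eq_map, List.foldl_cons, List.foldl_map]
    simp only [List.drop_zero, List.drop_succ_cons]
    rw [show (max 0 (Wsum (x :: t))) = max (0 : Int) (Wsum (x :: t)) from rfl]
    rw [foldl_max_init (fun k => Wsum (t.drop k)) (List.range t.length) 0 (Wsum (x :: t))]
    rw [ih]
    simp [maxAns]

theorem a_eq (xs : List Int) :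
    maxSatisfaction xs = maxAns (PySem.List.sorted xs (fun x => x) false) := by
  unfold maxSatisfaction
  simp only
  set s := PySem.List.sorted xs (fun x => x) false with hs
  have key : (PySem.List.pyRange 0 (s.length : Int) 1).foldl (fun ans i =>
        max ans ((PySem.List.pyRange i (s.length : Int) 1).foldl
          (fun curr j => curr + (j - i + 1) * PySem.List.pyGetD s j 0) 0)) 0
      = (PySem.List.pyRange 0 (s.length : Int) 1).foldl
          (fun ans i => max ans (Wsum (s.drop i.toNat))) 0 := by
    apply PySem.List.foldl_congr_mem
    intro ans i hi
    have hmem := (PySem.List.mem_pyRange_one).1 hi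
    have h0 : (0 : Int) ≤ i := hmem.1
    have hnat : ((i.toNat : Nat) : Int) = i := Int.toNat_of_nonneg h0
    congr 1
    rw [PySem.List.foldl_add, zero_add, ← hnat]
    exact inner_eq s (s.length - i.toNat) i.toNat rfl
  rw [key, PySem.List.pyRange_zero_nat, List.foldl_map]
  simp only [Int.toNat_natCast]
  exact outer_eq s

-- ===== VERDICT (by name: the statement is the Claim_ definition above) =====
theorem maxSatisfaction_spec : Claim_equal_maxSatisfaction := by
  intro xs _
  unfold Spec_maxSatisfaction
  rw [a_eq, alt_eq]
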